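-- pv_equiv track=rewrite | github.com/Sexisnull/work-script | c_portscan.py | scan_poll
-- ===== SOURCE A (Python) =====
-- def scan_poll(target):
--     targets = []
--     ports = ['21', '22', '23', '53', '67', '68', '69', '80', '81', '82', '88', '135', '139', '143', '161', '389', '443',
--              '445', '873', '888', '1090', '1091', '1099', '1433', '1521', '2049', '2181', '3306', '3389', '3690',
--              '5000',
--              '5001', '5002', '5060', '5061', '5432', '5632', '5900', '6000', '6379', '8443', '8888', '8983', '9200',
--              '9300', '50050', '50070', '7000-7100', '8000-8100', '9000-9100', '17000-17100', '18000-18100',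
--              '19000-19100', '27000-27100', '28000-28100', '29000-29100', ]
--     for t in target:
--         for p in ports:
--             if '-' in p:
--                 for p2 in range(int(p.split('-')[0]), int(p.split('-')[1]) + 1):
--                     targets.append(t + ':' + str(p2))
--             else:
--                 targets.append(t + ':' + p)
--
--     return targets
-- ===== SOURCE B (Python) =====
-- def scan_poll(target):
--     ports = ['21', '22', '23', '53', '67', '68', '69', '80', '81', '82', '88', '135', '139', '143', '161', '389', '443',
--              '445', '873', '888', '1090', '1091', '1099', '1433', '1521', '2049', '2181', '3306', '3389', '3690',
--              '5000',
--              '5001', '5002', '5060', '5061', '5432', '5632', '5900', '6000', '6379', '8443', '8888', '8983', '9200',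
--              '9300', '50050', '50070', '7000-7100', '8000-8100', '9000-9100', '17000-17100', '18000-18100',
--              '19000-19100', '27000-27100', '28000-28100', '29000-29100', ]
--
--     def expand(p):
--         # flatten one table entry: a '-' entry becomes its inclusive numeric range
--         i = p.find('-')
--         if i < 0:
--             return [p]
--         return [str(q) for q in range(int(p[:i]), int(p[i + 1:]) + 1)]
--
--     # one-time expansion table
--     all_ports = []
--     for p in ports:
--         all_ports += expand(p)
--
--     # single flat emission loop over the cross product via index arithmetic
--     n = len(all_ports)
--     return [target[k // n] + ':' + all_ports[k % n] for k in range(len(target) * n)]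
-- ===== Notes on version B (the rewrite author's own statement) =====
-- stated objective: alternative
-- what changed: B builds the expanded port table once (each range entry sliced at its first '-' and flattened) and then replaces A's nested target/port loops by a single flat pass over range(len(target)*n) that reconstructs each pair with index arithmetic target[k // n] + ':' + all_ports[k % n], so there is no nested loop and no per-target re-parsing of the range entries.
import Mathlib
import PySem

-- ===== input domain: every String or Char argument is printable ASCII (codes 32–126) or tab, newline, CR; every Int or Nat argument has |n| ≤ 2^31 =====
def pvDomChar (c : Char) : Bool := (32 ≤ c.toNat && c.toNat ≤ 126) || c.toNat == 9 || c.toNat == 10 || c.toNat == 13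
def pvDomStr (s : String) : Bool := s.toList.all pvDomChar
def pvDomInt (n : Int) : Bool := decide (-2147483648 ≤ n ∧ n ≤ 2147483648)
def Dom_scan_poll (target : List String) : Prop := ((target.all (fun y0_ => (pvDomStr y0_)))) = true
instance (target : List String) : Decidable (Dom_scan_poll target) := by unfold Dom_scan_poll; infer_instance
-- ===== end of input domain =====

-- B precomputes the expanded port table once and then emits the cross product with a single flat
-- index-arithmetic loop (result[k] = target[k // n] + ':' + all_ports[k % n]) instead of A's
-- nested per-target loops with range re-parsing and branching inside: objective 'alternative'.


-- the fixed module-level `ports` literal (shared data, not code)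
def pvPorts : List String :=
  ["21", "22", "23", "53", "67", "68", "69", "80", "81", "82", "88", "135", "139", "143", "161", "389", "443",
   "445", "873", "888", "1090", "1091", "1099", "1433", "1521", "2049", "2181", "3306", "3389", "3690",
   "5000",
   "5001", "5002", "5060", "5061", "5432", "5632", "5900", "6000", "6379", "8443", "8888", "8983", "9200",
   "9300", "50050", "50070", "7000-7100", "8000-8100", "9000-9100", "17000-17100", "18000-18100",
   "19000-19100", "27000-27100", "28000-28100", "29000-29100"]

-- ===== PORT A =====
-- int(...) via ofStr? with .getD 0: on the fixed `ports` literal the parse never fails, so the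
-- default is unreachable; likewise the .getD "" list index (split always yields ≥ 2 pieces here).
-- list.append is O(1) in Python, so the append loop is transliterated in the standard
-- reversed-accumulator form (cons per append, one reverse at the end).
def scan_poll (target : List String) : List String :=
  (target.foldl (fun targets t =>
    pvPorts.foldl (fun targets p =>
      if PySem.Str.isIn "-" p then
        (PySem.List.pyRange ((PySem.Int.ofStr? (((PySem.Str.split? p "-").getD []).getD 0 "")).getD 0)
            (((PySem.Int.ofStr? (((PySem.Str.split? p "-").getD []).getD 1 "")).getD 0) + 1) 1).foldl
          (fun targets p2 => (t ++ ":" ++ PySem.Int.toStr p2) :: targets) targets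
      else (t ++ ":" ++ p) :: targets) targets) []).reverse

-- ===== PORT B =====
-- Source B builds `all_ports` once (extend loop over the fixed table, the helper `expand` slicing each
-- range entry at its first '-'), then emits the whole result with ONE flat comprehension over
-- range(len(target) * n), indexing target[k // n] and all_ports[k % n].  Both indices are always
-- in range (0 ≤ k < len(target) * n, n > 0), so the Python indexing never raises; pyGetD's
-- defaults are unreachable, as is ofStr?'s (the fixed entries always parse).
def pvExpandRange (p : String) (i : Int) : List String :=
  (PySem.List.pyRange ((PySem.Int.ofStr? (PySem.Str.slice p none (some i))).getD 0)
      (((PySem.Int.ofStr? (PySem.Str.slice p (some (i + 1)) none)).getD 0) + 1) 1).map PySem.Int.toStr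

-- the helper `expand` of Source B
def pvExpandB (p : String) : List String :=
  let i := PySem.Str.find p "-"
  if i < 0 then [p] else pvExpandRange p i

def scan_poll_alt (target : List String) : List String :=
  let all_ports : List String := pvPorts.foldl (fun all_ports p => all_ports ++ pvExpandB p) []
  let n : Int := (all_ports.length : Int)
  (PySem.List.pyRange 0 ((target.length : Int) * n) 1).map (fun k =>
    PySem.List.pyGetD target (PySem.Int.floordiv k n) "" ++ ":" ++
      PySem.List.pyGetD all_ports (PySem.Int.mod k n) "")

-- ===== PRECONDITION & SPEC =====
def Spec_scan_poll (target : List String) (out : List String) : Prop := out = scan_poll_alt target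
instance (target : List String) (out : List String) : Decidable (Spec_scan_poll target out) := by unfold Spec_scan_poll; infer_instance

-- ===== CLAIM (what is proved, stated in full; the proofs are below) =====
def Claim_equal_scan_poll : Prop := ∀ (target : List String), Dom_scan_poll target → Spec_scan_poll target (scan_poll target)

-- ===== LEMMAS AND PROOFS =====

-- A's per-entry expansion, as a function (for stating the loop invariants)
def pvExpandA (p : String) : List String :=
  if PySem.Str.isIn "-" p then
    (PySem.List.pyRange ((PySem.Int.ofStr? (((PySem.Str.split? p "-").getD []).getD 0 "")).getD 0)
        (((PySem.Int.ofStr? (((PySem.Str.split? p "-").getD []).getD 1 "")).getD 0) + 1) 1).map PySem.Int.toStr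
  else [p]

-- B's port table equals the flatMap of pvExpandB
theorem pvTable_eq :
    (pvPorts.foldl (fun all_ports p => all_ports ++ pvExpandB p) []) = pvPorts.flatMap pvExpandB := by
  have h := PySem.List.foldl_append_eq_flatMap pvExpandB pvPorts []
  rw [List.nil_append] at h
  exact h

-- on each of the 56 fixed entries the two parses agree (split-based vs find/slice-based)
theorem pvExpand_agree : ∀ p ∈ pvPorts, pvExpandA p = pvExpandB p := by
  intro p hp
  fin_cases hp <;> decide

-- indexing a list by range(len) reproduces the list
theorem pvMapGetD {A B : Type} (ps : List A) (d : A) (f : A → B) :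
    (List.range ps.length).map (fun j => f (ps.getD j d)) = ps.map f := by
  apply List.ext_getElem
  · simp
  · intro i h1 h2
    simp only [List.getElem_map, List.getElem_range]
    rw [List.getD_eq_getElem?_getD, List.getElem?_eq_getElem (by simpa using h2)]
    rfl

-- an append-loop in reversed-accumulator form is the reversed map
theorem pvConsFold {A B : Type} (l : List A) (g : A → B) (acc : List B) :
    l.foldl (fun a x => g x :: a) acc = (l.map g).reverse ++ acc := by
  induction l generalizing acc with
  | nil => simp
  | cons x l ih => simp [ih]

-- A's inner loop over an arbitrary port list = (reversed) expansion table for that list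
theorem pvInner (t : String) (ps : List String) (acc : List String) :
    ps.foldl (fun targets p =>
      if PySem.Str.isIn "-" p then
        (PySem.List.pyRange ((PySem.Int.ofStr? (((PySem.Str.split? p "-").getD []).getD 0 "")).getD 0)
            (((PySem.Int.ofStr? (((PySem.Str.split? p "-").getD []).getD 1 "")).getD 0) + 1) 1).foldl
          (fun targets p2 => (t ++ ":" ++ PySem.Int.toStr p2) :: targets) targets
      else (t ++ ":" ++ p) :: targets) acc
    = ((ps.flatMap pvExpandA).map (fun p => t ++ ":" ++ p)).reverse ++ acc := by
  induction ps generalizing acc with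
  | nil => simp
  | cons p ps ih =>
    rw [List.foldl_cons]
    by_cases h : PySem.Str.isIn "-" p = true
    · rw [if_pos h, pvConsFold, ih]
      simp only [pvExpandA, List.flatMap_cons, List.map_append, if_pos h, List.map_map]
      simp [Function.comp_def, List.append_assoc]
    · rw [if_neg h, ih]
      simp only [pvExpandA, List.flatMap_cons, List.map_append, if_neg h]
      simp [List.append_assoc]

-- A's whole computation is the flatMap of the (A-parsed) expansion table
theorem pvA_eq (target : List String) :
    scan_poll target = target.flatMap (fun t => (pvPorts.flatMap pvExpandA).map (fun p => t ++ ":" ++ p)) := by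
  unfold scan_poll
  have : ∀ (ts : List String) (acc : List String),
      ts.foldl (fun targets t =>
        pvPorts.foldl (fun targets p =>
          if PySem.Str.isIn "-" p then
            (PySem.List.pyRange ((PySem.Int.ofStr? (((PySem.Str.split? p "-").getD []).getD 0 "")).getD 0)
                (((PySem.Int.ofStr? (((PySem.Str.split? p "-").getD []).getD 1 "")).getD 0) + 1) 1).foldl
              (fun targets p2 => (t ++ ":" ++ PySem.Int.toStr p2) :: targets) targets
          else (t ++ ":" ++ p) :: targets) targets) acc
      = (ts.flatMap (fun t => (pvPorts.flatMap pvExpandA).map (fun p => t ++ ":" ++ p))).reverse ++ acc := by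
    intro ts
    induction ts with
    | nil => simp
    | cons t ts ih =>
      intro acc
      rw [List.foldl_cons, pvInner, ih]
      simp [List.append_assoc]
  rw [this]
  simp

-- the flat index-arithmetic pass over range(m*n) is the nested cross product (Nat form)
theorem pvCrossNat (g : String → String → String) (ps : List String) (hps : ps ≠ [])
    (ts : List String) :
    (List.range (ts.length * ps.length)).map
        (fun k => g (ts.getD (k / ps.length) "") (ps.getD (k % ps.length) ""))
      = ts.flatMap (fun t => ps.map (g t)) := by
  have hn : 0 < ps.length := List.length_pos_iff.mpr hps
  induction ts using List.reverseRecOn with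
  | nil => simp
  | append_singleton ts t ih =>
    rw [List.length_append, List.length_singleton, Nat.add_mul, Nat.one_mul, List.range_add,
      List.map_append, List.map_map, List.flatMap_append]
    congr 1
    · rw [← ih]
      apply List.map_congr_left
      intro k hk
      rw [List.mem_range] at hk
      have hdiv : k / ps.length < ts.length :=
        Nat.div_lt_of_lt_mul (by rw [Nat.mul_comm]; exact hk)
      rw [List.getD_append _ _ _ _ hdiv]
    · simp only [List.flatMap_cons, List.flatMap_nil, List.append_nil, Function.comp_def]
      rw [← pvMapGetD ps "" (g t)]
      apply List.map_congr_left
      intro j hj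
      rw [List.mem_range] at hj
      have h1 : (ts.length * ps.length + j) / ps.length = ts.length := by
        rw [Nat.mul_comm, Nat.mul_add_div hn, Nat.div_eq_of_lt hj, Nat.add_zero]
      have h2 : (ts.length * ps.length + j) % ps.length = j := by
        rw [Nat.mul_comm, Nat.mul_add_mod, Nat.mod_eq_of_lt hj]
      rw [h1, h2]
      congr 1
      rw [List.getD_eq_getElem?_getD, List.getElem?_append_right (Nat.le_refl _)]
      simp

-- B's flat index-arithmetic pass over an arbitrary nonempty table is the nested cross product
theorem pvFlatIdx (ts ps : List String) (hps : ps ≠ []) :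
    (PySem.List.pyRange 0 ((ts.length : Int) * (ps.length : Int)) 1).map (fun k =>
        PySem.List.pyGetD ts (PySem.Int.floordiv k (ps.length : Int)) "" ++ ":" ++
          PySem.List.pyGetD ps (PySem.Int.mod k (ps.length : Int)) "")
      = ts.flatMap (fun t => ps.map (fun p => t ++ ":" ++ p)) := by
  have hcast : ((ts.length : Int) * (ps.length : Int)) = ((ts.length * ps.length : Nat) : Int) := by
    push_cast; ring
  rw [hcast, PySem.List.pyRange_zero_natCast, List.map_map]
  rw [← pvCrossNat (fun t p => t ++ ":" ++ p) ps hps ts]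
  apply List.map_congr_left
  intro k _
  simp only [Function.comp_apply, PySem.Int.floordiv_natCast, PySem.Int.mod_natCast,
    PySem.List.pyGetD_natCast]

-- B's table is nonempty
theorem pvTable_ne_nil : pvPorts.flatMap pvExpandB ≠ [] := by
  have h1 : pvExpandB "21" = ["21"] := by decide
  simp [pvPorts, h1]

-- B's port computes the cross product of targets with its table
theorem pvB_eq (target : List String) :
    scan_poll_alt target
      = target.flatMap (fun t => (pvPorts.flatMap pvExpandB).map (fun p => t ++ ":" ++ p)) := by
  unfold scan_poll_alt
  simp only [pvTable_eq]
  exact pvFlatIdx target (pvPorts.flatMap pvExpandB) pvTable_ne_nil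

-- ===== VERDICT (by name: the statement is the Claim_ definition above) =====
theorem scan_poll_spec : Claim_equal_scan_poll := by
  intro target _
  show scan_poll target = scan_poll_alt target
  rw [pvA_eq, pvB_eq, List.flatMap_def (f := pvExpandA), List.flatMap_def (f := pvExpandB),
    List.map_congr_left pvExpand_agree]
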